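-- pv_equiv track=rewrite | github.com/Netheriteingot/Zenith-Clicker-Damnation-Practice | main.py | compare_mod_strings
-- ===== SOURCE A (Python) =====
-- from collections import defaultdict
--
-- def compare_mod_strings(key: str, input_str: str) -> bool:
--     def are_mods_equal(mods1: str, mods2: str) -> bool:
--         return set(mods1.split()) == set(mods2.split())
--     if (are_mods_equal(key, input_str)): return True
--     mod_to_letter = {
--         'EX': 'q',
--         'NH': 'w',
--         'MS': 'e',
--         'GV': 'r',
--         'VL': 't',
--         'DH': 'y',
--         'IN': 'u',
--         'AS': 'i',
--         'DP': 'o'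
--     }
--     mods = key.split()
--     converted_chars = []
--     for mod in mods:
--         if mod in mod_to_letter:
--             converted_chars.append(mod_to_letter[mod])
--         else:
--             converted_chars.append('?')
--     converted_key = ''.join(converted_chars)
--     processed_input = input_str.replace(' ', '').lower()
--     if len(converted_key) != len(processed_input):
--         return False
--
--     key_counts = defaultdict(int)
--     input_counts = defaultdict(int)
--
--     for c in converted_key:
--         key_counts[c] += 1
--
--     for c in processed_input:
--         input_counts[c] += 1
--
--     return key_counts == input_counts
-- ===== SOURCE B (Python) =====
-- def compare_mod_strings(key: str, input_str: str) -> bool: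
--     if set(key.split()) == set(input_str.split()):
--         return True
--     mod_to_letter = {
--         'EX': 'q', 'NH': 'w', 'MS': 'e', 'GV': 'r', 'VL': 't',
--         'DH': 'y', 'IN': 'u', 'AS': 'i', 'DP': 'o'
--     }
--     converted_key = ''.join(mod_to_letter.get(m, '?') for m in key.split())
--     processed_input = input_str.replace(' ', '').lower()
--     return sorted(converted_key) == sorted(processed_input)
-- ===== Notes on version B (the rewrite author's own statement) =====
-- stated objective: idiomatic
-- what changed: The defaultdict count-table construction plus the separate length check are replaced by a single sorted-sequence comparison (sorted(converted_key) == sorted(processed_input)); the early set-equality return and the mod-to-letter conversion are kept.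
import Mathlib
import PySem

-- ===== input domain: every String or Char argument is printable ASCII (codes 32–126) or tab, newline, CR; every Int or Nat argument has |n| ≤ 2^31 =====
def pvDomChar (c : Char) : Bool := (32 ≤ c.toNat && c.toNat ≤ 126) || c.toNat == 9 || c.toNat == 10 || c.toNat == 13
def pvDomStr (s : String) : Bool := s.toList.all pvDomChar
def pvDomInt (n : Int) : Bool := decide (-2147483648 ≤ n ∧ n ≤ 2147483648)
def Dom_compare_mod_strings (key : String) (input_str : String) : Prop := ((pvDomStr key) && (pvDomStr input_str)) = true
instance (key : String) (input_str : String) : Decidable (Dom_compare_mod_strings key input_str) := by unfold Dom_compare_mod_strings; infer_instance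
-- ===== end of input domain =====

-- B replaces A's defaultdict counting (and its length pre-check) by a sorted-character comparison; same return value, idiomatic rewrite.

-- ===== PORT A =====
-- Python dict == ignores insertion order: modelled as keys-as-a-set equality plus
-- per-key value comparison (exact here: every stored count is looked up via getD 0,
-- and under equal key sets getD agrees with the stored value).
def pvDictEq (d1 d2 : PySem.Dict Char Int) : Bool :=
  PySem.Set.equal (PySem.Dict.keys d1) (PySem.Dict.keys d2) &&
    (PySem.Dict.keys d1).all (fun k => PySem.Dict.getD d1 k 0 == PySem.Dict.getD d2 k 0)

def pvModToLetter : PySem.Dict String Char :=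
  PySem.Dict.ofList [("EX",'q'),("NH",'w'),("MS",'e'),("GV",'r'),("VL",'t'),
                     ("DH",'y'),("IN",'u'),("AS",'i'),("DP",'o')]

def compare_mod_strings (key : String) (input_str : String) : Bool :=
  -- are_mods_equal(key, input_str)
  if PySem.Set.equal (PySem.Set.ofList (PySem.Str.split₀ key)) (PySem.Set.ofList (PySem.Str.split₀ input_str)) then true
  else
    let mods := PySem.Str.split₀ key
    let converted_chars : List Char :=
      mods.foldl (fun acc mod =>
        if PySem.Dict.contains pvModToLetter mod then
          acc ++ [(PySem.Dict.get? pvModToLetter mod).getD '?']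
        else acc ++ ['?']) []
    let converted_key := String.ofList converted_chars
    let processed_input := PySem.Str.lower (PySem.Str.replace input_str " " "")
    if converted_key.toList.length ≠ processed_input.toList.length then false
    else
      let key_counts := converted_key.toList.foldl (fun d c => PySem.Dict.modify d c 0 (· + 1)) PySem.Dict.empty
      let input_counts := processed_input.toList.foldl (fun d c => PySem.Dict.modify d c 0 (· + 1)) PySem.Dict.empty
      pvDictEq key_counts input_counts

-- ===== PORT B =====
def compare_mod_strings_alt (key : String) (input_str : String) : Bool :=
  if PySem.Set.equal (PySem.Set.ofList (PySem.Str.split₀ key)) (PySem.Set.ofList (PySem.Str.split₀ input_str)) then true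
  else
    let converted_key := String.ofList ((PySem.Str.split₀ key).map (fun m => PySem.Dict.getD pvModToLetter m '?'))
    let processed_input := PySem.Str.lower (PySem.Str.replace input_str " " "")
    decide (PySem.List.sorted converted_key.toList (fun x => x) false
          = PySem.List.sorted processed_input.toList (fun x => x) false)

-- ===== PRECONDITION & SPEC =====
def Spec_compare_mod_strings (key : String) (input_str : String) (out : Bool) : Prop := out = compare_mod_strings_alt key input_str
instance (key : String) (input_str : String) (out : Bool) : Decidable (Spec_compare_mod_strings key input_str out) := by unfold Spec_compare_mod_strings; infer_instance

-- ===== CLAIM (what is proved, stated in full; the proofs are below) =====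
def Claim_equal_compare_mod_strings : Prop := ∀ (key : String) (input_str : String), Dom_compare_mod_strings key input_str → Spec_compare_mod_strings key input_str (compare_mod_strings key input_str)

-- ===== LEMMAS AND PROOFS =====

-- dict == on two counters is multiset equality
theorem pvDictEq_counter_iff (xs ys : List Char) :
    pvDictEq (PySem.Dict.counter xs) (PySem.Dict.counter ys) = true ↔ xs.Perm ys := by
  rw [List.perm_iff_count]
  unfold pvDictEq
  simp only [Bool.and_eq_true, PySem.Dict.keys_counter, PySem.Set.equal_iff,
    PySem.Set.mem_ofList, List.all_eq_true, PySem.Dict.getD_counter, beq_iff_eq,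
    Nat.cast_inj]
  constructor
  · rintro ⟨hmem, hcnt⟩ v
    by_cases hv : v ∈ xs
    · exact hcnt v hv
    · have hv' : v ∉ ys := fun h => hv ((hmem v).2 h)
      rw [List.count_eq_zero_of_not_mem hv, List.count_eq_zero_of_not_mem hv']
  · intro h
    refine ⟨fun v => ?_, fun v _ => h v⟩
    constructor <;> intro hv
    · have := h v; rw [← List.count_pos_iff] at hv ⊢; omega
    · have := h v; rw [← List.count_pos_iff] at hv ⊢; omega

-- mapping one mod: A's contains/lookup branch equals B's getD
theorem pvGetD_branch (m : String) :
    (if PySem.Dict.contains pvModToLetter m then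
        (PySem.Dict.get? pvModToLetter m).getD '?' else '?')
      = PySem.Dict.getD pvModToLetter m '?' := by
  rw [PySem.Dict.contains_eq_isSome_get?, PySem.Dict.getD]
  cases PySem.Dict.get? pvModToLetter m <;> simp

theorem pvConverted_eq (mods : List String) :
    mods.foldl (fun acc mod =>
        if PySem.Dict.contains pvModToLetter mod then
          acc ++ [(PySem.Dict.get? pvModToLetter mod).getD '?']
        else acc ++ ['?']) []
      = mods.map (fun m => PySem.Dict.getD pvModToLetter m '?') := by
  have h : ∀ (a : List Char), mods.foldl (fun acc mod =>
        if PySem.Dict.contains pvModToLetter mod then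
          acc ++ [(PySem.Dict.get? pvModToLetter mod).getD '?']
        else acc ++ ['?']) a
      = a ++ mods.map (fun m => PySem.Dict.getD pvModToLetter m '?') := by
    induction mods with
    | nil => simp [List.foldl]
    | cons m t ih =>
      intro a
      simp only [List.foldl, List.map]
      rw [← pvGetD_branch m]
      split <;> rw [ih] <;> simp
  simpa using h []

-- ===== VERDICT (by name: the statement is the Claim_ definition above) =====
theorem compare_mod_strings_spec : Claim_equal_compare_mod_strings := by
  intro key input_str _
  unfold Spec_compare_mod_strings compare_mod_strings compare_mod_strings_alt
  split
  · rfl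
  · simp only []
    rw [pvConverted_eq]
    set L : List Char := (PySem.Str.split₀ key).map (fun m => PySem.Dict.getD pvModToLetter m '?') with hL
    set P : List Char := (PySem.Str.lower (PySem.Str.replace input_str " " "")).toList with hP
    have hmkL : (String.ofList L).toList = L := String.toList_ofList
    rw [hmkL]
    rw [← PySem.Dict.counter_eq_foldl, ← PySem.Dict.counter_eq_foldl]
    by_cases hlen : L.length = P.length
    · simp only [hlen, ne_eq, not_true_eq_false, if_false]
      · rw [Bool.eq_iff_iff, pvDictEq_counter_iff, decide_eq_true_iff,
          PySem.List.sorted_id_eq_sorted_id_iff_perm]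
    · rw [if_pos hlen]
      symm
      rw [decide_eq_false_iff_not, PySem.List.sorted_id_eq_sorted_id_iff_perm]
      exact fun hp => hlen hp.length_eq
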